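-- pv_equiv track=rewrite | github.com/NXP/el2go-agent | tst/el2go_blob_test/scripts/el2go_blob_test_pre.py | array_split
-- ===== SOURCE A (Python) =====
-- def array_split(lst: list, parts: int) -> list:
--     length = len(lst)
--     if(length <= 0):
--         return []
--
--     if(parts <= 0):
--         raise ValueError("There must be more than 0 parts!")
--     elif(length < parts):
--         raise ValueError("There must be less parts than items in the list!")
--
--
--     from math import ceil
--     steps = [ceil(length / parts)] * parts
--     for i in range(0, parts):
--         if(sum(steps) == length):
--             break
--         steps[parts - i - 1] -= 1
--
--     i = 0
--     result = []
--     for step in steps: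
--         result += [lst[i:i+step]]
--         i = i + step
--
--     return result
-- ===== SOURCE B (Python) =====
-- def array_split(lst: list, parts: int) -> list:
--     if len(lst) <= 0:
--         return []
--     if parts <= 0:
--         raise ValueError("There must be more than 0 parts!")
--     if len(lst) < parts:
--         raise ValueError("There must be less parts than items in the list!")
--     # Greedy: each chunk takes ceil(remaining / remaining_parts) items.
--     result = []
--     i = 0
--     p = parts
--     while p > 0:
--         size = -(-(len(lst) - i) // p)
--         result.append(lst[i:i + size])
--         i += size
--         p -= 1
--     return result
-- ===== Notes on version B (the rewrite author's own statement) =====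
-- stated objective: faster
-- what changed: B drops A's step list entirely: instead of pre-building parts copies of ceil(len/parts) and shrinking them in a loop that re-sums the whole list each iteration, B runs one greedy loop that slices off ceil(remaining/remaining_parts) items per chunk.
import Mathlib
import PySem

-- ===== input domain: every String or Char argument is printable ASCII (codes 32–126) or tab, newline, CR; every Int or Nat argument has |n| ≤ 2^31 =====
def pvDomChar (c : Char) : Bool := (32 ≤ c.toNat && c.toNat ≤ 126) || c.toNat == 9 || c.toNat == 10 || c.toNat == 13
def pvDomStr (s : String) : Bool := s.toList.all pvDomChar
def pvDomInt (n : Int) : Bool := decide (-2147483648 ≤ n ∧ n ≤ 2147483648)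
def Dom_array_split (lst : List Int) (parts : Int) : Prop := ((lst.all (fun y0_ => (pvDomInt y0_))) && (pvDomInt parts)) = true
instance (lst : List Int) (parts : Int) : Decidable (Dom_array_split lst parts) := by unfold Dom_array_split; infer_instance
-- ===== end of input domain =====

-- B replaces A's pre-built step list (adjusted by a loop that re-sums it each iteration, O(parts^2))
-- with a greedy single loop taking ceil(remaining/remaining_parts) items per chunk, O(n + parts).

-- ===== PORT A =====
-- steps[j] -= 1 for a nonnegative in-range index j (the only way A uses it)
def pvDecAt (l : List Int) (j : Int) : List Int := l.set j.toNat (l.getD j.toNat 0 - 1)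

def array_split (lst : List Int) (parts : Int) : List (List Int) :=
  let length : Int := lst.length
  if length ≤ 0 then []
  else if parts ≤ 0 then []          -- Python raises ValueError here: outside Pre_
  else if length < parts then []     -- Python raises ValueError here: outside Pre_
  else
    -- ceil(length / parts); exact for these magnitudes (float ceil is exact below 2^53)
    let c : Int := -(PySem.Int.floordiv (-length) parts)
    let steps0 : List Int := List.replicate parts.toNat c
    -- the 'break' is exact as an if-guard: once sum == length the state never changes again
    let steps : List Int := (PySem.List.pyRange 0 parts 1).foldl
      (fun st i => if st.sum = length then st else pvDecAt st (parts - i - 1)) steps0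
    (steps.foldl
      (fun (acc : Int × List (List Int)) step =>
        (acc.1 + step, acc.2 ++ [PySem.List.slice lst (some acc.1) (some (acc.1 + step))]))
      (0, [])).2

-- ===== PORT B =====
-- the while loop of Source B: p remaining parts, i current offset; one chunk of
-- size ceil((len-i)/p) per iteration
def pvGreedy (lst : List Int) : Nat → Int → List (List Int)
  | 0, _ => []
  | p + 1, i =>
    let size : Int := -(PySem.Int.floordiv (-((lst.length : Int) - i)) ((p : Int) + 1))
    PySem.List.slice lst (some i) (some (i + size)) :: pvGreedy lst p (i + size)

def array_split_alt (lst : List Int) (parts : Int) : List (List Int) :=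
  if (lst.length : Int) ≤ 0 then []
  else if parts ≤ 0 then []                    -- Python raises ValueError here: outside Pre_
  else if (lst.length : Int) < parts then []   -- Python raises ValueError here: outside Pre_
  else pvGreedy lst parts.toNat 0

-- ===== PRECONDITION & SPEC =====
-- Pre_ excludes exactly the inputs on which A raises ValueError (parts ≤ 0, or more parts than items)
def Pre_array_split (lst : List Int) (parts : Int) : Prop :=
  lst = [] ∨ (1 ≤ parts ∧ parts ≤ (lst.length : Int))
instance (lst : List Int) (parts : Int) : Decidable (Pre_array_split lst parts) := by
  unfold Pre_array_split; infer_instance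
def pvWitness_array_split : List Int × Int := ([1, 2, 3, 4, 5], 2)

def Spec_array_split (lst : List Int) (parts : Int) (out : List (List Int)) : Prop := out = array_split_alt lst parts
instance (lst : List Int) (parts : Int) (out : List (List Int)) : Decidable (Spec_array_split lst parts out) := by unfold Spec_array_split; infer_instance

-- ===== CLAIM (what is proved, stated in full; the proofs are below) =====
def Claim_equal_array_split : Prop := ∀ (lst : List Int) (parts : Int), Dom_array_split lst parts → Pre_array_split lst parts → Spec_array_split lst parts (array_split lst parts)

-- ===== LEMMAS AND PROOFS =====

-- the canonical size list: r = L % p chunks of q+1 = L/p + 1, then p - r chunks of q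
def pvSzs (p : Nat) (L : Int) : List Int :=
  if p = 0 then []
  else List.replicate (L % (p : Int)).toNat (L / (p : Int) + 1) ++
       List.replicate (p - (L % (p : Int)).toNat) (L / (p : Int))

-- slicing lst into consecutive chunks of the given sizes starting at offset i
def pvChunks (lst : List Int) : Int → List Int → List (List Int)
  | _, [] => []
  | i, s :: ss => PySem.List.slice lst (some i) (some (i + s)) :: pvChunks lst (i + s) ss

-- A's slicing fold, characterised as pvChunks
theorem pv_fold_chunks (lst : List Int) :
    ∀ (sizes : List Int) (i : Int) (acc : List (List Int)),
      (sizes.foldl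
        (fun (a : Int × List (List Int)) step =>
          (a.1 + step, a.2 ++ [PySem.List.slice lst (some a.1) (some (a.1 + step))]))
        (i, acc)).2 = acc ++ pvChunks lst i sizes := by
  intro sizes
  induction sizes with
  | nil => intro i acc; simp [pvChunks]
  | cons s ss ih =>
    intro i acc
    simp only [List.foldl_cons, pvChunks]
    rw [ih]
    simp

-- divmod characterisation for a positive divisor
theorem pv_divmod (R P q r : Int) (hP : 0 < P) (hr : 0 ≤ r) (hr2 : r < P)
    (h : R = P * q + r) : R / P = q ∧ R % P = r := by
  exact (Int.ediv_emod_unique'' (by omega)).mpr ⟨by omega, hr, by rw [abs_of_pos hP]; exact hr2⟩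

-- one greedy step: ceil(R/(p+1)) is the head of the size list, and the tail is the
-- size list for the remainder
theorem pv_szs_cons (p : Nat) (R c : Int) (hR : 0 ≤ R)
    (hbr : (c - 1) * ((p : Int) + 1) < R ∧ R ≤ c * ((p : Int) + 1)) :
    pvSzs (p + 1) R = c :: pvSzs p (R - c) := by
  set P : Int := (p : Int) + 1 with hP
  have hPpos : (0 : Int) < P := by omega
  have hq := Int.mul_ediv_add_emod R P
  have hr0 : 0 ≤ R % P := Int.emod_nonneg R (by omega)
  have hrP : R % P < P := Int.emod_lt_of_pos R hPpos
  set q : Int := R / P with hqdef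
  set r : Int := R % P with hrdef
  have hRqr : R = P * q + r := by omega
  have hq0 : 0 ≤ q := by nlinarith
  by_cases hr : r = 0
  · -- exact division: c = q, tail sizes all q
    have hc : c = q := by nlinarith
    subst hc
    have hcast : ((p + 1 : Nat) : Int) = P := by push_cast; omega
    unfold pvSzs
    rw [if_neg (by omega : ¬ p + 1 = 0), hcast, ← hrdef, ← hqdef, hr]
    simp only [Int.toNat_zero, List.replicate_zero, List.nil_append, Nat.sub_zero,
      List.replicate_succ]
    congr 1
    rcases Nat.eq_zero_or_pos p with hp0 | hp0
    · subst hp0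
      have : R - q = 0 := by omega
      rw [this]; rfl
    · have hR' : R - q = (p : Int) * q + 0 := by rw [hRqr, hr, hP]; ring
      have hdm := pv_divmod (R - q) (p : Int) q 0 (by omega) le_rfl (by omega) hR'
      rw [if_neg (by omega : ¬ p = 0), hdm.1, hdm.2]
      simp
  · -- r > 0: c = q + 1, one big chunk off the front
    have hrpos : 0 < r := lt_of_le_of_ne hr0 (Ne.symm hr)
    have hppos : 0 < p := by
      by_contra h0
      have : p = 0 := by omega
      subst this
      simp only [Nat.cast_zero, zero_add] at hP
      omega
    have hc : c = q + 1 := by nlinarith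
    subst hc
    have hcast : ((p + 1 : Nat) : Int) = P := by push_cast; omega
    unfold pvSzs
    rw [if_neg (by omega : ¬ p + 1 = 0), hcast, ← hrdef, ← hqdef]
    have hR' : R - (q + 1) = (p : Int) * q + (r - 1) := by rw [hRqr, hP]; ring
    have hdm := pv_divmod (R - (q + 1)) (p : Int) q (r - 1) (by exact_mod_cast hppos)
      (by omega) (by omega) hR'
    rw [if_neg (by omega : ¬ p = 0), hdm.1, hdm.2]
    obtain ⟨m, hm⟩ : ∃ m, r.toNat = m + 1 := ⟨r.toNat - 1, by omega⟩
    have hm' : (r - 1).toNat = m := by omega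
    rw [hm, hm', List.replicate_succ]
    have hcount : p + 1 - (m + 1) = p - m := by omega
    rw [hcount]
    simp

-- the greedy loop produces exactly the canonical chunks
theorem pv_greedy_chunks (lst : List Int) :
    ∀ (p : Nat) (i : Int), 0 ≤ (lst.length : Int) - i →
      pvGreedy lst p i = pvChunks lst i (pvSzs p ((lst.length : Int) - i)) := by
  intro p
  induction p with
  | zero => intro i _; simp [pvGreedy, pvSzs, pvChunks]
  | succ k ih =>
    intro i hi
    set R : Int := (lst.length : Int) - i with hRdef
    unfold pvGreedy
    set c : Int := -(PySem.Int.floordiv (-R) ((k : Int) + 1)) with hcdef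
    have hbr : (c - 1) * ((k : Int) + 1) < R ∧ R ≤ c * ((k : Int) + 1) :=
      (PySem.Int.neg_floordiv_neg_eq_iff_of_pos (a := R) (b := (k : Int) + 1) (q := c)
        (by omega)).mp rfl
    have hc0 : 0 ≤ c := by nlinarith
    have hcR : c ≤ R := by nlinarith
    rw [pv_szs_cons k R c hi hbr]
    simp only [pvChunks]
    congr 1
    have hR' : (lst.length : Int) - (i + c) = R - c := by omega
    rw [ih (i + c) (by omega), hR']

-- A's adjusted step list equals the canonical size list
theorem pv_set_replicate_last (n : Nat) (a b : Int) :
    (List.replicate (n + 1) a).set n b = List.replicate n a ++ [b] := by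
  induction n with
  | zero => rfl
  | succ k ih =>
    rw [List.replicate_succ, List.set_cons_succ, ih, List.replicate_succ, List.cons_append]

theorem pv_sum_state (p k : Nat) (c : Int) (hk : k ≤ p) :
    (List.replicate (p - k) c ++ List.replicate k (c - 1)).sum = p * c - k := by
  simp [List.sum_append, List.sum_replicate]
  have : ((p - k : Nat) : Int) = (p : Int) - k := by omega
  rw [this]; ring

theorem pv_adjust_step (p k : Nat) (c : Int) (hk : k < p) :
    pvDecAt (List.replicate (p - k) c ++ List.replicate k (c - 1)) ((p : Int) - k - 1) =
      List.replicate (p - (k + 1)) c ++ List.replicate (k + 1) (c - 1) := by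
  obtain ⟨n, hn⟩ : ∃ n, p - k = n + 1 := ⟨p - k - 1, by omega⟩
  have hj : ((p : Int) - k - 1).toNat = n := by omega
  have hpk1 : p - (k + 1) = n := by omega
  unfold pvDecAt
  rw [hj, hn, hpk1]
  have hlt : n < (List.replicate (n + 1) c).length := by simp
  rw [List.getD_append _ _ _ _ hlt, List.set_append, if_pos hlt]
  have hg : (List.replicate (n + 1) c).getD n 0 = c := by
    rw [List.getD_eq_getElem _ _ hlt]; simp
  rw [hg, pv_set_replicate_last]
  simp [List.replicate_succ]

theorem pv_adjust_fix (L : Int) (f : List Int → Int → List Int)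
    (hf : ∀ st i, st.sum = L → f st i = st) :
    ∀ (l : List Int) (st : List Int), st.sum = L →
      l.foldl f st = st := by
  intro l
  induction l with
  | nil => intro st _; rfl
  | cons x xs ih => intro st h; simp [List.foldl, hf st x h, ih st h]

theorem pv_adjust_eq (p e : Nat) (c : Int) (he : e ≤ p) :
    (PySem.List.pyRange 0 (p : Int) 1).foldl
      (fun st i => if st.sum = (p : Int) * c - e then st else pvDecAt st ((p : Int) - i - 1))
      (List.replicate p c) =
      List.replicate (p - e) c ++ List.replicate e (c - 1) := by
  have hsplit : PySem.List.pyRange 0 (p : Int) 1 =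
      PySem.List.pyRange 0 (e : Int) 1 ++ PySem.List.pyRange (e : Int) (p : Int) 1 :=
    PySem.List.pyRange_one_append 0 (e : Int) (p : Int) (by omega) (by exact_mod_cast he)
  rw [hsplit, List.foldl_append]
  have phase1 : ∀ (m k : Nat), k + m = e →
      (PySem.List.pyRange (k : Int) (e : Int) 1).foldl
        (fun st i => if st.sum = (p : Int) * c - e then st else pvDecAt st ((p : Int) - i - 1))
        (List.replicate (p - k) c ++ List.replicate k (c - 1)) =
        List.replicate (p - e) c ++ List.replicate e (c - 1) := by
    intro m
    induction m with
    | zero =>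
      intro k hk
      have : k = e := by omega
      subst this
      rw [PySem.List.pyRange_one_eq_nil (by omega)]
      rfl
    | succ m ih =>
      intro k hk
      have hke : (k : Int) < (e : Int) := by exact_mod_cast (by omega : k < e)
      rw [PySem.List.pyRange_one_cons hke]
      simp only [List.foldl_cons]
      have hsum : (List.replicate (p - k) c ++ List.replicate k (c - 1)).sum = (p : Int) * c - k :=
        pv_sum_state p k c (by omega)
      rw [hsum]
      have hne : ¬ ((p : Int) * c - k = (p : Int) * c - e) := by
        intro h
        have : (k : Int) = e := by omega
        omega
      rw [if_neg hne, pv_adjust_step p k c (by omega)]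
      have : ((k : Int) + 1) = ((k + 1 : Nat) : Int) := by push_cast; ring
      rw [this]
      exact ih (k + 1) (by omega)
  have h0 : (PySem.List.pyRange 0 (e : Int) 1).foldl
      (fun st i => if st.sum = (p : Int) * c - e then st else pvDecAt st ((p : Int) - i - 1))
      (List.replicate p c) = List.replicate (p - e) c ++ List.replicate e (c - 1) := by
    have := phase1 e 0 (by omega)
    simpa using this
  rw [h0]
  exact pv_adjust_fix ((p : Int) * c - e) _
    (fun st i h => by simp [h]) _ _ (pv_sum_state p e c he)

-- A's final step list is the canonical size list
theorem pv_steps_eq_szs (p : Nat) (hp : 1 ≤ p) (L c : Int) (hL : 0 ≤ L)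
    (hbr : (c - 1) * (p : Int) < L ∧ L ≤ c * (p : Int))
    (e : Nat) (he : (e : Int) = (p : Int) * c - L) :
    List.replicate (p - e) c ++ List.replicate e (c - 1) = pvSzs p L := by
  have hPpos : (0 : Int) < (p : Int) := by exact_mod_cast hp
  have hq := Int.mul_ediv_add_emod L (p : Int)
  have hr0 : 0 ≤ L % (p : Int) := Int.emod_nonneg L (by omega)
  have hrP : L % (p : Int) < (p : Int) := Int.emod_lt_of_pos L hPpos
  set q : Int := L / (p : Int) with hqdef
  set r : Int := L % (p : Int) with hrdef
  have hLqr : L = (p : Int) * q + r := by omega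
  unfold pvSzs
  rw [if_neg (by omega : ¬ p = 0), ← hrdef, ← hqdef]
  by_cases hr : r = 0
  · have hc : c = q := by nlinarith
    have he0' : (e : Int) = 0 := by rw [he, hc, hLqr, hr]; ring
    have he0 : e = 0 := by omega
    subst hc; subst he0
    rw [hr]
    simp
  · have hrpos : 0 < r := lt_of_le_of_ne hr0 (Ne.symm hr)
    have hc : c = q + 1 := by nlinarith
    subst hc
    have he' : (e : Int) = (p : Int) - r := by rw [he, hLqr]; ring
    have h1 : r.toNat = p - e := by omega
    rw [h1]
    have h2 : p - (p - e) = e := by omega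
    rw [h2]
    norm_num

-- ===== VERDICT (by name: the statement is the Claim_ definition above) =====
theorem array_split_spec : Claim_equal_array_split := by
  intro lst parts _ hpre
  unfold Spec_array_split array_split array_split_alt
  rcases hpre with h | ⟨h1, h2⟩
  · subst h; simp
  · have hlen : ¬ ((lst.length : Int) ≤ 0) := by omega
    have hp : ¬ (parts ≤ 0) := by omega
    have hlp : ¬ ((lst.length : Int) < parts) := by omega
    simp only [hlen, hp, hlp, if_false]
    set L : Int := (lst.length : Int) with hL
    set c : Int := -(PySem.Int.floordiv (-L) parts) with hc
    have hbr : (c - 1) * parts < L ∧ L ≤ c * parts :=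
      (PySem.Int.neg_floordiv_neg_eq_iff_of_pos (a := L) (b := parts) (q := c)
        (by omega)).mp rfl
    set p : Nat := parts.toNat with hpn
    have hpcast : (p : Int) = parts := by omega
    have hbound : 0 ≤ parts * c - L ∧ parts * c - L < parts := by
      constructor <;> nlinarith [hbr.1, hbr.2]
    set e : Nat := (parts * c - L).toNat with he
    have hecast : (e : Int) = parts * c - L := by omega
    have hep : e ≤ p := by omega
    -- A's adjusted step list
    have hsteps :
        (PySem.List.pyRange 0 parts 1).foldl
          (fun st i => if st.sum = L then st else pvDecAt st (parts - i - 1))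
          (List.replicate parts.toNat c) =
          List.replicate (p - e) c ++ List.replicate e (c - 1) := by
      have hLe : L = (p : Int) * c - e := by rw [hpcast, hecast]; ring
      rw [← hpcast, hLe]
      exact pv_adjust_eq p e c hep
    rw [hsteps]
    rw [pv_fold_chunks lst _ 0 []]
    rw [pv_steps_eq_szs p (by omega) L c (by omega)
      (by rw [hpcast]; exact hbr) e (by rw [hpcast]; exact hecast)]
    rw [pv_greedy_chunks lst p 0 (by omega)]
    norm_num [← hL]
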